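-- pv_equiv track=rewrite | github.com/ShristiShrestha/fmindex | BWT.py | create_s12
-- ===== SOURCE A (Python) =====
-- def create_s12(current_text):
--     # creating the array
--     s1 = []
--     s2 = []
--
--     # filling the triplet arrays
--     for idx in range(len(current_text)):
--         if (idx % 3) == 1:
--             s1.append(idx)
--         elif (idx % 3) == 2:
--             s2.append(idx)
--     return s1 + s2
-- ===== SOURCE B (Python) =====
-- def create_s12(current_text):
--     n = len(current_text)
--     return list(range(1, n, 3)) + list(range(2, n, 3))
-- ===== Notes on version B (the rewrite author's own statement) =====
-- stated objective: simpler
-- what changed: Replaces the scan over every index with a modulo branch and two accumulators by constructing each congruence class directly as a stepped range (range(1,n,3) and range(2,n,3)) and concatenating them.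
import Mathlib
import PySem

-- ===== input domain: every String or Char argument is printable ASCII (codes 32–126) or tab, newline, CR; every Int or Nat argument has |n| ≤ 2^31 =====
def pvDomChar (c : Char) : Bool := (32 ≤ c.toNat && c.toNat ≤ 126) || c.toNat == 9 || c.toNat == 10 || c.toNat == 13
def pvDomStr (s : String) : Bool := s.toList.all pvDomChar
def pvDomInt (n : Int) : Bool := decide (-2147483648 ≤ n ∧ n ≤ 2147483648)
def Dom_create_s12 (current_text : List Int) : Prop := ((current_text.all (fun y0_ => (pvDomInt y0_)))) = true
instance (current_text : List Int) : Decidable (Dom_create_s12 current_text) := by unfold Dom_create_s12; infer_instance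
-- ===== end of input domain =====

-- B replaces A's single scan-with-modulo-branch by building each congruence class
-- directly as a stepped range (range(1,n,3) ++ range(2,n,3)): simpler, no branch per index.


-- ===== PORT A =====
-- for idx in range(len(current_text)): append idx to s1 / s2 by idx % 3
def create_s12 (current_text : List Int) : List Int :=
  let s1 : List Int := []
  let s2 : List Int := []
  let p := (PySem.List.pyRange 0 (current_text.length : Int) 1).foldl
    (fun (p : List Int × List Int) idx =>
      if PySem.Int.mod idx 3 = 1 then (p.1 ++ [idx], p.2)
      else if PySem.Int.mod idx 3 = 2 then (p.1, p.2 ++ [idx])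
      else p) (s1, s2)
  p.1 ++ p.2

-- ===== PORT B =====
-- list(range(1, n, 3)) + list(range(2, n, 3))
def create_s12_alt (current_text : List Int) : List Int :=
  let n : Int := current_text.length
  PySem.List.pyRange 1 n 3 ++ PySem.List.pyRange 2 n 3

-- ===== PRECONDITION & SPEC =====
def Spec_create_s12 (current_text : List Int) (out : List Int) : Prop := out = create_s12_alt current_text
instance (current_text : List Int) (out : List Int) : Decidable (Spec_create_s12 current_text out) := by unfold Spec_create_s12; infer_instance

-- ===== CLAIM (what is proved, stated in full; the proofs are below) =====
def Claim_equal_create_s12 : Prop := ∀ (current_text : List Int), Dom_create_s12 current_text → Spec_create_s12 current_text (create_s12 current_text)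

-- ===== LEMMAS AND PROOFS =====

-- A's loop body appends to the accumulators by the residue of idx mod 3
theorem pv_loop_spec (l : List Int) (s1 s2 : List Int) :
    l.foldl (fun (p : List Int × List Int) idx =>
      if PySem.Int.mod idx 3 = 1 then (p.1 ++ [idx], p.2)
      else if PySem.Int.mod idx 3 = 2 then (p.1, p.2 ++ [idx])
      else p) (s1, s2)
    = (s1 ++ l.filter (fun x => PySem.Int.mod x 3 = 1),
       s2 ++ l.filter (fun x => PySem.Int.mod x 3 = 2)) := by
  induction l generalizing s1 s2 with
  | nil => simp
  | cons x xs ih =>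
    rw [List.foldl_cons, List.filter_cons, List.filter_cons]
    by_cases h1 : x % 3 = 1
    · rw [if_pos (show PySem.Int.mod x 3 = 1 by simp [h1]), ih,
          if_pos (show decide (PySem.Int.mod x 3 = 1) = true by simp [h1]),
          if_neg (show ¬ decide (PySem.Int.mod x 3 = 2) = true by simp; omega)]
      simp
    · by_cases h2 : x % 3 = 2
      · rw [if_neg (show ¬ PySem.Int.mod x 3 = 1 by simp; omega),
            if_pos (show PySem.Int.mod x 3 = 2 by simp [h2]), ih,
            if_neg (show ¬ decide (PySem.Int.mod x 3 = 1) = true by simp; omega),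
            if_pos (show decide (PySem.Int.mod x 3 = 2) = true by simp [h2])]
        simp
      · rw [if_neg (show ¬ PySem.Int.mod x 3 = 1 by simp; omega),
            if_neg (show ¬ PySem.Int.mod x 3 = 2 by simp; omega), ih,
            if_neg (show ¬ decide (PySem.Int.mod x 3 = 1) = true by simp; omega),
            if_neg (show ¬ decide (PySem.Int.mod x 3 = 2) = true by simp; omega)]

-- appending one more index to a step-3 range
theorem pv_pyRange3_succ (a m : Nat) (ha : 0 < a) (ha3 : a < 3) :
    PySem.List.pyRange (a : Int) ((m : Int) + 1) 3
      = PySem.List.pyRange (a : Int) (m : Int) 3 ++ (if m % 3 = a then [(m : Int)] else []) := by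
  rw [PySem.List.pyRange_of_pos _ _ (by norm_num : (0:Int) < 3),
      PySem.List.pyRange_of_pos _ _ (by norm_num : (0:Int) < 3)]
  by_cases h : m % 3 = a
  · rw [if_pos h]
    have hc1 : (if (a:Int) < (m:Int) + 1 then (((m:Int) + 1 - a + 3 - 1) / 3).toNat else 0)
        = (if (a:Int) < (m:Int) then (((m:Int) - a + 3 - 1) / 3).toNat else 0) + 1 := by
      split_ifs <;> omega
    rw [hc1, List.range_succ, List.map_append]
    congr 1
    simp only [List.map_cons, List.map_nil, List.cons.injEq, and_true]
    split_ifs <;> omega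
  · rw [if_neg h]
    have hc1 : (if (a:Int) < (m:Int) + 1 then (((m:Int) + 1 - a + 3 - 1) / 3).toNat else 0)
        = (if (a:Int) < (m:Int) then (((m:Int) - a + 3 - 1) / 3).toNat else 0) := by
      split_ifs <;> omega
    rw [hc1, List.append_nil]

-- filtering range(n) by residue a mod 3 gives the stepped range range(a, n, 3)
theorem pv_filter_range (a : Nat) (ha : 0 < a) (ha3 : a < 3) (n : Nat) :
    (PySem.List.pyRange 0 (n : Int) 1).filter (fun x => PySem.Int.mod x 3 = (a : Int))
      = PySem.List.pyRange (a : Int) (n : Int) 3 := by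
  induction n with
  | zero =>
    simp [PySem.List.pyRange_one_eq_nil (by norm_num : (0:Int) ≤ 0)]
    rw [PySem.List.pyRange_of_pos _ _ (by norm_num : (0:Int) < 3)]
    simp [show ¬ ((a:Int) < 0) by omega]
  | succ m ih =>
    have h1 : ((m : Int) + 1) = ((m + 1 : Nat) : Int) := by push_cast; ring
    rw [← h1, PySem.List.pyRange_one_succ_right (by omega : (0:Int) ≤ (m : Int)),
        List.filter_append, ih, pv_pyRange3_succ a m ha ha3]
    congr 1
    by_cases h : m % 3 = a
    · have hm : PySem.Int.mod (m : Int) 3 = (a : Int) := by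
        simp only [PySem.Int.mod]
        rw [Int.fmod_eq_emod]
        simp
        omega
      simp [h]
      omega
    · have hm : ¬ PySem.Int.mod (m : Int) 3 = (a : Int) := by
        simp only [PySem.Int.mod]
        rw [Int.fmod_eq_emod]
        simp
        omega
      simp [h]
      omega

-- ===== VERDICT (by name: the statement is the Claim_ definition above) =====
theorem create_s12_spec : Claim_equal_create_s12 := by
  intro t _
  show create_s12 t = create_s12_alt t
  unfold create_s12 create_s12_alt
  simp only [pv_loop_spec, List.nil_append]
  rw [show ((1:Int)) = ((1:Nat) : Int) by norm_num,
      show ((2:Int)) = ((2:Nat) : Int) by norm_num,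
      show ((t.length : Int)) = (((t.length : Nat)) : Int) by norm_num,
      ← pv_filter_range 1 (by norm_num) (by norm_num) t.length,
      ← pv_filter_range 2 (by norm_num) (by norm_num) t.length]
  norm_num
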